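-- pv_equiv track=rewrite | github.com/widlarizer/yosys-perf | thing.py | classify_cells
-- ===== SOURCE A (Python) =====
-- def classify_cells(cells_breakdown, cell_cats):
--     """
--     Given a dict of {cell_type: count} from stat output and a
--     classification dict from dump_cell_groups, return category totals
--     and per-type breakdown.
--
--     Returns (totals, by_type) where:
--       totals = {"seq": N, "mem": N, "comb": N, "other": N}
--       by_type = {"seq": {type: count, ...}, ...}
--     """
--     totals = {"seq": 0, "mem": 0, "comb": 0, "other": 0}
--     by_type = {"seq": {}, "mem": {}, "comb": {}, "other": {}}
--
--     for cell_type, count in cells_breakdown.items():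
--         cat = cell_cats.get(cell_type, "other")
--
--         totals[cat] += count
--         by_type[cat][cell_type] = count
--
--     return totals, by_type
-- ===== SOURCE B (Python) =====
-- def classify_cells(cells_breakdown, cell_cats):
--     """Category-at-a-time decomposition: for each of the four fixed categories,
--     collect its entries with one filter pass, then derive both the breakdown
--     dict and the total from that list."""
--     CATS = ("seq", "mem", "comb", "other")
--     totals = {}
--     by_type = {}
--     for cat in CATS:
--         entries = [(t, n) for t, n in cells_breakdown.items()
--                    if cell_cats.get(t, "other") == cat]
--         by_type[cat] = dict(entries)
--         totals[cat] = sum(n for _, n in entries)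
--     return totals, by_type
-- ===== Notes on version B (the rewrite author's own statement) =====
-- stated objective: alternative
-- what changed: Instead of one dispatch loop that accumulates totals and breakdowns in place per cell, B makes one filter pass per fixed category, builds each category's breakdown dict from that filtered list, and derives the total by summing it.
import Mathlib
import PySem

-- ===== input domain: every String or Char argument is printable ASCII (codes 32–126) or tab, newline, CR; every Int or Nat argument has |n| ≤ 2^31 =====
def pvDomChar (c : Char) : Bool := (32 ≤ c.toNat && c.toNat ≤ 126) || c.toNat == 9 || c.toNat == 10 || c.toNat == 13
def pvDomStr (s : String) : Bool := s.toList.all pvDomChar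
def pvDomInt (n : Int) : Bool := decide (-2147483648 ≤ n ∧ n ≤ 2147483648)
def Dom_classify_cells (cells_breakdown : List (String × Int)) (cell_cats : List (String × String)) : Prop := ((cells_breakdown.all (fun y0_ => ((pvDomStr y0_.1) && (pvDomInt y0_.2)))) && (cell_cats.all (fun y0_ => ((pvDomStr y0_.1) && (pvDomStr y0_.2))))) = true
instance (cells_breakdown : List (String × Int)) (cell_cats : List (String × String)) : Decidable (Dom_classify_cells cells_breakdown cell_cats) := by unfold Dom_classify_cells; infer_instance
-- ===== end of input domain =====

-- B replaces A's single dispatch-and-accumulate loop by one filter pass per fixed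
-- category, deriving each total from the category's entry list (objective: alternative).

-- ===== PORT A =====
def classify_cells (cells_breakdown : List (String × Int)) (cell_cats : List (String × String)) : (List (String × Int)) × (List (String × List (String × Int))) :=
  let ccd : PySem.Dict String String := PySem.Dict.mk cell_cats
  let totals0 : PySem.Dict String Int :=
    PySem.Dict.mk [("seq", 0), ("mem", 0), ("comb", 0), ("other", 0)]
  let byType0 : PySem.Dict String (PySem.Dict String Int) :=
    PySem.Dict.mk [("seq", PySem.Dict.empty), ("mem", PySem.Dict.empty), ("comb", PySem.Dict.empty), ("other", PySem.Dict.empty)]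
  -- totals[cat] += count / by_type[cat][cell_type] = count: Python raises KeyError when
  -- cat is not one of the four keys; Pre_ excludes that, `modify` totalizes it here.
  let st := cells_breakdown.foldl
    (fun st p =>
      let cat := ccd.getD p.1 "other"
      (st.1.modify cat 0 (· + p.2),
       st.2.modify cat PySem.Dict.empty (fun d => d.insert p.1 p.2)))
    (totals0, byType0)
  (st.1.items, st.2.items.map (fun q => (q.1, q.2.items)))

-- ===== PORT B =====
def classify_cells_alt (cells_breakdown : List (String × Int)) (cell_cats : List (String × String)) : (List (String × Int)) × (List (String × List (String × Int))) :=
  let ccd : PySem.Dict String String := PySem.Dict.mk cell_cats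
  let cats : List String := ["seq", "mem", "comb", "other"]
  let rows := cats.map (fun cat =>
    let entries := cells_breakdown.filter (fun p => ccd.getD p.1 "other" == cat)
    (cat, entries, PySem.Dict.ofList entries))
  (rows.map (fun r => (r.1, (r.2.1.map (·.2)).sum)),
   rows.map (fun r => (r.1, r.2.2.items)))

-- ===== PRECONDITION & SPEC =====
-- Pre_ excludes exactly the inputs on which some cell's looked-up category string is
-- outside the four fixed categories: there Python A raises KeyError (no value returned).
def Pre_classify_cells (cells_breakdown : List (String × Int)) (cell_cats : List (String × String)) : Prop :=
  ∀ p ∈ cells_breakdown,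
    (PySem.Dict.mk cell_cats).getD p.1 "other" ∈ ["seq", "mem", "comb", "other"]
instance (cells_breakdown : List (String × Int)) (cell_cats : List (String × String)) : Decidable (Pre_classify_cells cells_breakdown cell_cats) := by unfold Pre_classify_cells; infer_instance
def pvWitness_classify_cells : (List (String × Int)) × (List (String × String)) :=
  ([("dff", 2), ("lut4", 3), ("ram", 1)], [("dff", "seq"), ("lut4", "comb")])
def Spec_classify_cells (cells_breakdown : List (String × Int)) (cell_cats : List (String × String)) (out : (List (String × Int)) × (List (String × List (String × Int)))) : Prop := out = classify_cells_alt cells_breakdown cell_cats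
instance (cells_breakdown : List (String × Int)) (cell_cats : List (String × String)) (out : (List (String × Int)) × (List (String × List (String × Int)))) : Decidable (Spec_classify_cells cells_breakdown cell_cats out) := by unfold Spec_classify_cells; infer_instance

-- ===== CLAIM (what is proved, stated in full; the proofs are below) =====
def Claim_equal_classify_cells : Prop := ∀ (cells_breakdown : List (String × Int)) (cell_cats : List (String × String)), Dom_classify_cells cells_breakdown cell_cats → Pre_classify_cells cells_breakdown cell_cats → Spec_classify_cells cells_breakdown cell_cats (classify_cells cells_breakdown cell_cats)

-- ===== LEMMAS AND PROOFS =====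
def pvCats : List String := ["seq", "mem", "comb", "other"]

lemma pv_keys_cats {ν : Type} (T : PySem.Dict String ν) (f : String → ν)
    (hT : T.items = pvCats.map (fun c => (c, f c))) : T.keys = pvCats := by
  simp only [PySem.Dict.keys, hT, List.map_map]
  exact (List.map_congr_left fun c _ => rfl).trans (List.map_id _)

lemma pv_getD_cats {ν : Type} (T : PySem.Dict String ν) (f : String → ν)
    (hT : T.items = pvCats.map (fun c => (c, f c))) {cat : String} (hc : cat ∈ pvCats)
    (d0 : ν) : T.getD cat d0 = f cat := by
  apply PySem.Dict.getD_of_mem_items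
  · rw [hT]; exact List.mem_map.2 ⟨cat, hc, rfl⟩
  · rw [pv_keys_cats T f hT]; decide

lemma pv_items_insert_cats {ν : Type} (T : PySem.Dict String ν) (f : String → ν)
    (hT : T.items = pvCats.map (fun c => (c, f c))) {cat : String} (hc : cat ∈ pvCats)
    (v : ν) :
    (T.insert cat v).items = pvCats.map (fun c => (c, if c == cat then v else f c)) := by
  have hcont : T.contains cat = true := by
    rw [PySem.Dict.contains_iff_mem_keys, pv_keys_cats T f hT]; exact hc
  rw [PySem.Dict.items_insert_of_contains T v hcont, hT, List.map_map]
  apply List.map_congr_left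
  intro c _
  by_cases h : c = cat
  · subst h; simp
  · simp [h, beq_iff_eq]

lemma pv_fold_invariant (cell_cats : List (String × String)) (cb : List (String × Int))
    (t : String → Int) (g : String → PySem.Dict String Int)
    (T : PySem.Dict String Int) (B : PySem.Dict String (PySem.Dict String Int))
    (hT : T.items = pvCats.map (fun c => (c, t c)))
    (hB : B.items = pvCats.map (fun c => (c, g c)))
    (hpre : ∀ p ∈ cb, (PySem.Dict.mk cell_cats).getD p.1 "other" ∈ pvCats) :
    (cb.foldl (fun st p =>
        let cat := (PySem.Dict.mk cell_cats).getD p.1 "other"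
        (st.1.modify cat 0 (· + p.2),
         st.2.modify cat PySem.Dict.empty (fun d => d.insert p.1 p.2))) (T, B)).1.items
      = pvCats.map (fun c => (c, t c +
          ((cb.filter (fun p => (PySem.Dict.mk cell_cats).getD p.1 "other" == c)).map (·.2)).sum))
    ∧ (cb.foldl (fun st p =>
        let cat := (PySem.Dict.mk cell_cats).getD p.1 "other"
        (st.1.modify cat 0 (· + p.2),
         st.2.modify cat PySem.Dict.empty (fun d => d.insert p.1 p.2))) (T, B)).2.items
      = pvCats.map (fun c => (c,
          (cb.filter (fun p => (PySem.Dict.mk cell_cats).getD p.1 "other" == c)).foldl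
            (fun d p => d.insert p.1 p.2) (g c))) := by
  induction cb generalizing t g T B with
  | nil =>
    refine ⟨?_, ?_⟩ <;> simp only [List.foldl_nil, List.filter_nil, List.map_nil,
      List.sum_nil, add_zero] <;> [exact hT; exact hB]
  | cons p tl ih =>
    have hcat : (PySem.Dict.mk cell_cats).getD p.1 "other" ∈ pvCats :=
      hpre p (List.mem_cons_self ..)
    set cat := (PySem.Dict.mk cell_cats).getD p.1 "other" with hcatdef
    have hT' : (T.modify cat 0 (· + p.2)).items
        = pvCats.map (fun c => (c, if c == cat then t cat + p.2 else t c)) := by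
      show (T.insert cat (T.getD cat 0 + p.2)).items = _
      rw [pv_getD_cats T t hT hcat]
      exact pv_items_insert_cats T t hT hcat _
    have hB' : (B.modify cat PySem.Dict.empty (fun d => d.insert p.1 p.2)).items
        = pvCats.map (fun c => (c, if c == cat then (g cat).insert p.1 p.2 else g c)) := by
      show (B.insert cat ((B.getD cat PySem.Dict.empty).insert p.1 p.2)).items = _
      rw [pv_getD_cats B g hB hcat]
      exact pv_items_insert_cats B g hB hcat _
    have hpre' : ∀ q ∈ tl, (PySem.Dict.mk cell_cats).getD q.1 "other" ∈ pvCats :=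
      fun q hq => hpre q (List.mem_cons_of_mem _ hq)
    have := ih (fun c => if c == cat then t cat + p.2 else t c)
      (fun c => if c == cat then (g cat).insert p.1 p.2 else g c) _ _ hT' hB' hpre'
    refine ⟨?_, ?_⟩
    · rw [List.foldl_cons]
      refine (this.1).trans ?_
      apply List.map_congr_left
      intro c _
      by_cases h : c = cat
      · subst h
        simp only [List.filter_cons, ← hcatdef, beq_self_eq_true, ite_true, List.map_cons, List.sum_cons]
        ring_nf
      · have h1 : (c == cat) = false := by simp [h]
        have h2 : (cat == c) = false := by simp; exact fun e => h e.symm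
        simp [← hcatdef, h1, h2]
    · rw [List.foldl_cons]
      refine (this.2).trans ?_
      apply List.map_congr_left
      intro c _
      by_cases h : c = cat
      · subst h
        simp [← hcatdef]
      · have h1 : (c == cat) = false := by simp [h]
        have h2 : (cat == c) = false := by simp; exact fun e => h e.symm
        simp [← hcatdef, h1, h2]

-- ===== VERDICT (by name: the statement is the Claim_ definition above) =====
lemma pv_ofList_foldl (l : List (String × Int)) :
    PySem.Dict.ofList l = l.foldl (fun d p => d.insert p.1 p.2) PySem.Dict.empty := rfl

theorem classify_cells_spec : Claim_equal_classify_cells := by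
  intro cb cc _hdom hpre
  have hpre' : ∀ p ∈ cb, (PySem.Dict.mk cc).getD p.1 "other" ∈ pvCats := hpre
  have hinv := pv_fold_invariant cc cb (fun _ => 0) (fun _ => PySem.Dict.empty)
    (PySem.Dict.mk [("seq", 0), ("mem", 0), ("comb", 0), ("other", 0)])
    (PySem.Dict.mk [("seq", PySem.Dict.empty), ("mem", PySem.Dict.empty), ("comb", PySem.Dict.empty), ("other", PySem.Dict.empty)])
    (by simp [pvCats]) (by simp [pvCats]) hpre'
  show classify_cells cb cc = classify_cells_alt cb cc
  unfold classify_cells classify_cells_alt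
  dsimp only
  refine Prod.ext ?_ ?_
  · rw [hinv.1]
    simp [pvCats]
  · rw [hinv.2]
    simp [pvCats, pv_ofList_foldl]
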